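-- pv_equiv track=rewrite | github.com/peter-lang/aoc | 14.py | left_tilt_row
-- ===== SOURCE A (Python) =====
-- ROW = tuple[int, ...]
--
-- def left_tilt_row(row: ROW) -> ROW:
--     res = [0] * len(row)
--     tar = 0
--     for i, v in enumerate(row):
--         if v == 1:
--             res[tar] = 1
--             tar += 1
--         elif v == -1:
--             res[i] = -1
--             tar = i + 1
--     return tuple(res)
-- ===== SOURCE B (Python) =====
-- def left_tilt_row(row):
--     out = []
--     seg_len = 0
--     seg_ones = 0
--     for v in row:
--         if v == -1:
--             out += [1] * seg_ones + [0] * (seg_len - seg_ones) + [-1]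
--             seg_len = 0
--             seg_ones = 0
--         else:
--             seg_len += 1
--             if v == 1:
--                 seg_ones += 1
--     out += [1] * seg_ones + [0] * (seg_len - seg_ones)
--     return tuple(out)
-- ===== Notes on version B (the rewrite author's own statement) =====
-- stated objective: simpler
-- what changed: A slides rocks with an in-place target-cursor write into a preallocated array; B makes one pass that counts the 1s of each wall-delimited segment and emits ones-then-zeros per segment at each wall and once at the end.
import Mathlib
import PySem

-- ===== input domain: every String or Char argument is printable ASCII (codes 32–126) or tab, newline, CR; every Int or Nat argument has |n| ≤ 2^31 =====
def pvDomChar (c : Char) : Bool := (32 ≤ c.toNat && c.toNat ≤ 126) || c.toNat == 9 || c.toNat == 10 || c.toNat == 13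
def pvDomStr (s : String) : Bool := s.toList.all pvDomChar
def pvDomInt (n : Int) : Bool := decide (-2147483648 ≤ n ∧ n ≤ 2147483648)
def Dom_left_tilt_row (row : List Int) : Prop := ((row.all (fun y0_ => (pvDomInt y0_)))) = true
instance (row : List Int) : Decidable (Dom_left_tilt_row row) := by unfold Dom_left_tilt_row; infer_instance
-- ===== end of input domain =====

-- B replaces A's in-place cursor writes with a one-pass segment flush (count 1s per wall-delimited
-- segment, emit ones then zeros); objective: simpler decomposition, same cost.

-- ===== PORT A =====
-- A's loop step: state (res, tar); both write indices are always nonnegative and in range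
-- (tar ≤ i < len row), so List.set at .toNat is exact for Python's res[...] = ... here.
def left_tilt_row_step (st : List Int × Int) (p : Int × Int) : List Int × Int :=
  if p.2 = 1 then (st.1.set st.2.toNat 1, st.2 + 1)
  else if p.2 = -1 then (st.1.set p.1.toNat (-1), p.1 + 1)
  else st

def left_tilt_row (row : List Int) : List Int :=
  ((PySem.List.enumerate row 0).foldl left_tilt_row_step
    (List.replicate row.length (0 : Int), (0 : Int))).1

-- ===== PORT B =====
-- B's loop step: state (out, seg_len, seg_ones)
def left_tilt_row_alt_step (st : List Int × Nat × Nat) (v : Int) : List Int × Nat × Nat :=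
  if v = -1 then
    (st.1 ++ List.replicate st.2.2 (1 : Int) ++ List.replicate (st.2.1 - st.2.2) (0 : Int) ++ [-1], 0, 0)
  else (st.1, st.2.1 + 1, if v = 1 then st.2.2 + 1 else st.2.2)

def left_tilt_row_alt (row : List Int) : List Int :=
  let st := row.foldl left_tilt_row_alt_step ([], 0, 0)
  st.1 ++ List.replicate st.2.2 (1 : Int) ++ List.replicate (st.2.1 - st.2.2) (0 : Int)

-- ===== PRECONDITION & SPEC =====
def Spec_left_tilt_row (row : List Int) (out : List Int) : Prop := out = left_tilt_row_alt row
instance (row : List Int) (out : List Int) : Decidable (Spec_left_tilt_row row out) := by unfold Spec_left_tilt_row; infer_instance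

-- ===== CLAIM (what is proved, stated in full; the proofs are below) =====
def Claim_equal_left_tilt_row : Prop := ∀ (row : List Int), Dom_left_tilt_row row → Spec_left_tilt_row row (left_tilt_row row)

-- ===== LEMMAS AND PROOFS =====

-- step-reduction lemmas for the two folds
theorem stepA_one (res : List Int) (t i : Int) :
    left_tilt_row_step (res, t) (i, 1) = (res.set t.toNat 1, t + 1) := by
  simp [left_tilt_row_step]

theorem stepA_wall (res : List Int) (t i : Int) :
    left_tilt_row_step (res, t) (i, -1) = (res.set i.toNat (-1), i + 1) := by
  norm_num [left_tilt_row_step]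

theorem stepA_other (res : List Int) (t i v : Int) (h1 : v ≠ 1) (h2 : v ≠ -1) :
    left_tilt_row_step (res, t) (i, v) = (res, t) := by
  simp [left_tilt_row_step, h1, h2]

theorem stepB_one (out : List Int) (s k : Nat) :
    left_tilt_row_alt_step (out, s, k) 1 = (out, s + 1, k + 1) := by
  norm_num [left_tilt_row_alt_step]

theorem stepB_wall (out : List Int) (s k : Nat) :
    left_tilt_row_alt_step (out, s, k) (-1)
      = (out ++ List.replicate k (1 : Int) ++ List.replicate (s - k) (0 : Int) ++ [-1], 0, 0) := by
  simp [left_tilt_row_alt_step]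

theorem stepB_other (out : List Int) (s k : Nat) (v : Int) (h1 : v ≠ 1) (h2 : v ≠ -1) :
    left_tilt_row_alt_step (out, s, k) v = (out, s + 1, k) := by
  simp [left_tilt_row_alt_step, h1, h2]

theorem set_append_right (a b : List Int) (i : Nat) (x : Int) :
    (a ++ b).set (a.length + i) x = a ++ b.set i x := by
  induction a with
  | nil => simp
  | cons h t ih => simp [Nat.succ_add, ih]

-- setting the (pre.length + a)-th cell of pre ++ 0^(a+(b+1)) hits the zero at offset a
theorem set_zeros (pre : List Int) (a b : Nat) (x : Int) :
    (pre ++ List.replicate (a + (b + 1)) (0 : Int)).set (pre.length + a) x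
      = pre ++ List.replicate a (0 : Int) ++ x :: List.replicate b (0 : Int) := by
  rw [← List.replicate_append_replicate, ← List.append_assoc,
    show pre.length + a = (pre ++ List.replicate a (0 : Int)).length + 0 by simp,
    set_append_right]
  simp [List.replicate_succ]

-- the loop invariant: A's (res, tar) after a prefix is determined by B's (out, seg_len, seg_ones)
theorem tilt_invariant : ∀ (rest out : List Int) (s k z : Nat) (t n : Int),
    k ≤ s → z = (s - k) + rest.length →
    t = ((out.length + k : Nat) : Int) → n = ((out.length + s : Nat) : Int) →
    ((PySem.List.enumerate rest n).foldl left_tilt_row_step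
        (out ++ List.replicate k (1 : Int) ++ List.replicate z (0 : Int), t)).1
      = (let st := rest.foldl left_tilt_row_alt_step (out, s, k)
         st.1 ++ List.replicate st.2.2 (1 : Int) ++ List.replicate (st.2.1 - st.2.2) (0 : Int)) := by
  intro rest
  induction rest with
  | nil =>
    intro out s k z t n hk hz ht hn
    simp [PySem.List.enumerate_nil, hz]
  | cons v rest ih =>
    intro out s k z t n hk hz ht hn
    simp only [List.length_cons] at hz
    subst ht hn
    rw [PySem.List.enumerate_cons]
    simp only [List.foldl_cons]
    by_cases h1 : v = 1
    · subst h1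
      rw [stepA_one, stepB_one, Int.toNat_natCast,
        show z = 0 + (((s - k) + rest.length) + 1) by omega,
        show out.length + k = (out ++ List.replicate k (1 : Int)).length + 0 by simp,
        set_zeros,
        show (out ++ List.replicate k (1 : Int)) ++ List.replicate 0 (0 : Int) ++
              (1 : Int) :: List.replicate ((s - k) + rest.length) (0 : Int)
            = out ++ List.replicate (k + 1) (1 : Int) ++
              List.replicate ((s - k) + rest.length) (0 : Int) by
          simp [List.replicate_succ', List.append_assoc]]
      exact ih out (s + 1) (k + 1) ((s - k) + rest.length) _ _ (by omega) (by omega)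
        (by push_cast [List.length_append, List.length_replicate]; omega) (by push_cast [List.length_append, List.length_replicate]; omega)
    · by_cases h2 : v = -1
      · subst h2
        rw [stepA_wall, stepB_wall, Int.toNat_natCast,
          show z = (s - k) + (rest.length + 1) by omega,
          show out.length + s = (out ++ List.replicate k (1 : Int)).length + (s - k) by
            simp; omega,
          set_zeros,
          show (out ++ List.replicate k (1 : Int)) ++ List.replicate (s - k) (0 : Int) ++
                (-1 : Int) :: List.replicate rest.length (0 : Int)
              = (out ++ List.replicate k (1 : Int) ++ List.replicate (s - k) (0 : Int) ++ [-1]) ++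
                List.replicate 0 (1 : Int) ++ List.replicate rest.length (0 : Int) by
            simp]
        exact ih (out ++ List.replicate k (1 : Int) ++ List.replicate (s - k) (0 : Int) ++ [-1])
          0 0 rest.length _ _ (le_refl 0) (by omega)
          (by push_cast [List.length_append, List.length_replicate, List.length_cons, List.length_nil]; omega) (by push_cast [List.length_append, List.length_replicate, List.length_cons, List.length_nil]; omega)
      · rw [stepA_other _ _ _ _ h1 h2, stepB_other _ _ _ _ h1 h2]
        exact ih out (s + 1) k z _ _ (by omega) (by omega) rfl (by push_cast; ring)

-- ===== VERDICT (by name: the statement is the Claim_ definition above) =====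
theorem left_tilt_row_spec : Claim_equal_left_tilt_row := by
  intro row _
  show left_tilt_row row = left_tilt_row_alt row
  unfold left_tilt_row left_tilt_row_alt
  have h := tilt_invariant row [] 0 0 row.length 0 0 (le_refl 0) (by omega) (by simp) (by simp)
  simpa using h
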